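-- pv_equiv track=rewrite | github.com/kinorax/comfyui-info-prompt-toolkit | utils/a1111_infotext.py | _find_hashes_pair_start
-- ===== SOURCE A (Python) =====
-- _PARAM_HASHES = "Hashes"
--
-- def _find_hashes_pair_start(line: str) -> int:
--     search_from = 0
--     token = f"{_PARAM_HASHES}:"
--     while True:
--         idx = line.find(token, search_from)
--         if idx < 0:
--             return -1
--
--         probe = idx - 1
--         while probe >= 0 and line[probe] == " ":
--             probe -= 1
--         if probe < 0 or line[probe] == ",":
--             return idx
--
--         search_from = idx + len(token)
-- ===== SOURCE B (Python) =====
-- _PARAM_HASHES = "Hashes"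
--
-- def _find_hashes_pair_start(line: str) -> int:
--     # One forward pass: `ok` tracks whether the current position is the line
--     # start or is preceded by a comma followed only by spaces.
--     token = f"{_PARAM_HASHES}:"
--     ok = True
--     for i, ch in enumerate(line):
--         if ok and line.startswith(token, i):
--             return i
--         ok = ch == "," or (ok and ch == " ")
--     return -1
-- ===== Notes on version B (the rewrite author's own statement) =====
-- stated objective: alternative
-- what changed: Replaces the find()+backward-space-backtracking loop by a single forward scan that maintains a boolean anchor-validity flag (start of line, or after a comma plus only spaces) and tests startswith at each position.
import Mathlib
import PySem

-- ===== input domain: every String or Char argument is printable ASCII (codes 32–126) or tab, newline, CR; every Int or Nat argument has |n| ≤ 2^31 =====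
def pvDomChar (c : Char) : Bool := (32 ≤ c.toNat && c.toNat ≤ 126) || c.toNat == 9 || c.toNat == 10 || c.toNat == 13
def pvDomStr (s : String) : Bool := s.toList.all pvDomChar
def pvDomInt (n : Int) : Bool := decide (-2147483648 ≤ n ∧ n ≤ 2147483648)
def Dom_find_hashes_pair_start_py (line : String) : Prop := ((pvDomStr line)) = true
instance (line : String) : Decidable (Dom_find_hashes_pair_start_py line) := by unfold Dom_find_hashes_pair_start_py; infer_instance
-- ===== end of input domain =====

-- B replaces A's find()+backward-space-backtracking loop by a single forward scan with a
-- boolean anchor-validity flag (alternative decomposition, same results).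

-- ===== PORT A =====
-- token = f"{_PARAM_HASHES}:"
def pvTok : List Char := ("Hashes" ++ ":").toList

-- inner `while probe >= 0 and line[probe] == " "` loop followed by the
-- `probe < 0 or line[probe] == ","` test (returned as a Bool)
def pvAProbe (s : List Char) (probe : Int) : Bool :=
  if h : 0 ≤ probe ∧ PySem.List.pyGet? s probe = some ' ' then
    pvAProbe s (probe - 1)
  else
    decide (probe < 0) || (PySem.List.pyGet? s probe == some ',')
termination_by (probe + 1).toNat
decreasing_by omega

-- outer `while True` loop over line.find(token, search_from)
def pvALoop (s : List Char) (searchFrom : Nat) : Int :=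
  let idx := PySem.Chars.findFrom s pvTok (searchFrom : Int) none
  if idx < 0 then -1
  else if pvAProbe s (idx - 1) then idx
  else pvALoop s (idx.toNat + pvTok.length)
termination_by s.length + pvTok.length - searchFrom
decreasing_by
  rename_i h1 h2
  simp only [idx] at h1
  by_cases hk : searchFrom ≤ s.length
  · have hspec := PySem.Chars.findFrom_natCast_spec s pvTok searchFrom hk (by omega)
    obtain ⟨hle, hpre, -⟩ := hspec
    have hlen : pvTok.length ≤ (s.drop (PySem.Chars.findFrom s pvTok (searchFrom:Int) none).toNat).length :=
      hpre.length_le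
    simp only [List.length_drop] at hlen
    have htok : 0 < pvTok.length := by decide
    omega
  · exfalso
    have : PySem.Chars.findFrom s pvTok (searchFrom : Int) none = -1 := by
      simp only [PySem.Chars.findFrom]
      have : ¬ ((searchFrom : Int) < 0) := by omega
      simp [this]
      omega
    omega

def find_hashes_pair_start_py (line : String) : Int :=
  pvALoop line.toList 0

-- ===== PORT B =====
-- the `for i, ch in enumerate(line)` loop; `suffix` is line[i:], `ok` the anchor state;
-- line.startswith(token, i) is startswith on the suffix
def pvTokAlt : List Char := ("Hashes" ++ ":").toList

def pvBScan : List Char → Bool → Nat → Int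
  | [], _, _ => -1
  | c :: rest, ok, i =>
    if ok && PySem.Chars.startswith (c :: rest) pvTokAlt then (i : Int)
    else pvBScan rest (c == ',' || (ok && c == ' ')) (i + 1)

def find_hashes_pair_start_py_alt (line : String) : Int :=
  pvBScan line.toList true 0

-- ===== PRECONDITION & SPEC =====
def Spec_find_hashes_pair_start_py (line : String) (out : Int) : Prop := out = find_hashes_pair_start_py_alt line
instance (line : String) (out : Int) : Decidable (Spec_find_hashes_pair_start_py line out) := by unfold Spec_find_hashes_pair_start_py; infer_instance

-- ===== CLAIM (what is proved, stated in full; the proofs are below) =====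
def Claim_equal_find_hashes_pair_start_py : Prop := ∀ (line : String), Dom_find_hashes_pair_start_py line → Spec_find_hashes_pair_start_py line (find_hashes_pair_start_py line)

-- ===== LEMMAS AND PROOFS =====

-- anchor state after the first i characters (what B's `ok` holds at position i)
def pvOkAt (s : List Char) (i : Nat) : Bool :=
  (s.take i).foldl (fun ok c => c == ',' || (ok && c == ' ')) true

theorem pvTokAlt_eq : pvTokAlt = pvTok := rfl

-- the common specification: first position i with a valid anchor and the token, else -1
def pvMinVal (s : List Char) (i : Nat) : Int :=
  if h : i < s.length then
    if pvOkAt s i && PySem.Chars.startswith (s.drop i) pvTok then (i : Int)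
    else pvMinVal s (i + 1)
  else -1
termination_by s.length - i

theorem pvOkAt_succ (s : List Char) (i : Nat) (h : i < s.length) :
    pvOkAt s (i + 1) = (s[i] == ',' || (pvOkAt s i && s[i] == ' ')) := by
  unfold pvOkAt
  rw [List.take_add_one, List.getElem?_eq_getElem h]
  simp only [Option.toList_some, List.foldl_append, List.foldl_cons, List.foldl_nil]

theorem pvAProbe_eq_okAt (s : List Char) : ∀ i, i ≤ s.length →
    pvAProbe s ((i : Int) - 1) = pvOkAt s i := by
  intro i
  induction i with
  | zero =>
    intro _
    rw [pvAProbe]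
    simp [pvOkAt]
  | succ i ih =>
    intro h
    have hc : ((i + 1 : Nat) : Int) - 1 = (i : Int) := by push_cast; ring
    rw [hc, pvAProbe]
    have hlt : i < s.length := by omega
    have hget : PySem.List.pyGet? s (i : Int) = some s[i] := by
      rw [PySem.List.pyGet?_natCast, List.getElem?_eq_getElem hlt]
    rw [pvOkAt_succ s i hlt]
    by_cases hsp : s[i] = ' '
    · rw [dif_pos ⟨by omega, by rw [hget, hsp]⟩, ih (by omega), hsp]
      simp
    · have hcond : ¬ (0 ≤ (i : Int) ∧ PySem.List.pyGet? s (i : Int) = some ' ') := by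
        rw [hget]; simp [hsp]
      rw [dif_neg hcond, hget]
      have : ¬ ((i : Int) < 0) := by omega
      simp [this, hsp]

theorem pvBScan_eq_minVal (s : List Char) : ∀ i, pvBScan (s.drop i) (pvOkAt s i) i = pvMinVal s i := by
  have key : ∀ n i, s.length - i = n → pvBScan (s.drop i) (pvOkAt s i) i = pvMinVal s i := by
    intro n
    induction n with
    | zero =>
      intro i hn
      have hge : s.length ≤ i := by omega
      rw [List.drop_eq_nil_iff.mpr hge, pvMinVal, dif_neg (by omega)]
      rfl
    | succ n ih =>
      intro i hn
      have hlt : i < s.length := by omega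
      rw [pvMinVal, dif_pos hlt]
      rw [List.drop_eq_getElem_cons hlt, pvBScan, pvTokAlt_eq, ← List.drop_eq_getElem_cons hlt]
      by_cases hc : (pvOkAt s i && PySem.Chars.startswith (s.drop i) pvTok) = true
      · rw [if_pos hc, if_pos hc]
      · rw [if_neg hc, if_neg hc, ← pvOkAt_succ s i hlt]
        exact ih (i + 1) (by omega)
  exact fun i => key (s.length - i) i rfl

theorem pvTok_no_overlap (s : List Char) (a j : Nat) (h1 : pvTok <+: s.drop a)
    (hlt : a < j) (hub : j < a + pvTok.length) : ¬ pvTok <+: s.drop j := by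
  intro h2
  have hlen1 : pvTok.length ≤ s.length - a := by
    have := h1.length_le; simpa using this
  have hlen2 : pvTok.length ≤ s.length - j := by
    have := h2.length_le; simpa using this
  have htok : pvTok.length = 7 := by decide
  -- s[j] is 'H' (the head of the token at j) but also the (j-a)-th char of the token at a
  have e1 : pvTok[0] = s[j]'(by omega) := by
    have h0 : (0:Nat) < pvTok.length := by omega
    have := h2.getElem h0
    rwa [List.getElem_drop] at this
  have hk : j - a < pvTok.length := by omega
  have e2 : pvTok[j - a] = s[j]'(by omega) := by
    have := h1.getElem hk
    rw [List.getElem_drop] at this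
    convert this using 2
    omega
  have hH : pvTok[j - a]? = pvTok[0]? := by
    rw [List.getElem?_eq_getElem hk, List.getElem?_eq_getElem (by omega : (0:Nat) < pvTok.length), e1, e2]
  have hno : ∀ k, 1 ≤ k → k ≤ 6 → pvTok[k]? ≠ pvTok[0]? := by decide
  exact hno (j - a) (by omega) (by omega) hH

theorem pvMinVal_skip (s : List Char) (a b : Nat) (hab : a ≤ b)
    (hno : ∀ j, a ≤ j → j < b →
      (pvOkAt s j && PySem.Chars.startswith (s.drop j) pvTok) = false) :
    pvMinVal s a = pvMinVal s b := by
  have key : ∀ n a, a ≤ b → b - a = n →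
      (∀ j, a ≤ j → j < b → (pvOkAt s j && PySem.Chars.startswith (s.drop j) pvTok) = false) →
      pvMinVal s a = pvMinVal s b := by
    intro n
    induction n with
    | zero =>
      intro a hab hn _
      have : a = b := by omega
      rw [this]
    | succ n ih =>
      intro a hab hn hno
      have halt : a < b := by omega
      by_cases hlen : a < s.length
      · rw [pvMinVal, dif_pos hlen, if_neg (by simp [hno a le_rfl halt])]
        exact ih (a + 1) (by omega) (by omega) (fun j h1 h2 => hno j (by omega) h2)
      · rw [pvMinVal, dif_neg hlen, pvMinVal, dif_neg (by omega)]
  exact key (b - a) a hab rfl hno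

theorem pvMinVal_eq_neg_one (s : List Char) (a : Nat)
    (hno : ∀ j, a ≤ j → ¬ pvTok <+: s.drop j) : pvMinVal s a = -1 := by
  by_cases hab : a ≤ s.length
  · rw [pvMinVal_skip s a s.length hab (fun j h1 _ => by
      have := hno j h1
      simp only [Bool.and_eq_false_iff]
      right
      exact (Bool.not_eq_true _).mp (fun hsw => this ((PySem.Chars.startswith_iff _ _).mp hsw)))]
    rw [pvMinVal, dif_neg (by omega)]
  · rw [pvMinVal, dif_neg (by omega)]

theorem pvALoop_eq_minVal (s : List Char) : ∀ k, k ≤ s.length → pvALoop s k = pvMinVal s k := by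
  have htok : pvTok.length = 7 := by decide
  have key : ∀ n k, k ≤ s.length → s.length + pvTok.length - k = n → pvALoop s k = pvMinVal s k := by
    intro n
    induction n using Nat.strong_induction_on with
    | _ n ih =>
      intro k hk hn
      rw [pvALoop]
      set r := PySem.Chars.findFrom s pvTok (k : Int) none with hrdef
      show (if r < 0 then (-1 : Int)
            else if pvAProbe s (r - 1) then r
            else pvALoop s (r.toNat + pvTok.length)) = pvMinVal s k
      by_cases hne : r = -1
      · rw [if_pos (by rw [hne]; decide)]
        symm
        apply pvMinVal_eq_neg_one
        have hni : ¬ pvTok <:+: List.drop k s :=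
          (PySem.Chars.findFrom_natCast_eq_neg_one_iff s pvTok k hk).mp (hrdef ▸ hne)
        intro j hj hpre
        apply hni
        have hdd : pvTok <+: (List.drop k s).drop (j - k) := by
          rw [List.drop_drop]
          have : k + (j - k) = j := by omega
          rw [this]
          exact hpre
        exact hdd.isInfix.trans (List.drop_suffix _ _).isInfix
      · obtain ⟨hle, hpre, hmin⟩ := PySem.Chars.findFrom_natCast_spec s pvTok k hk (hrdef ▸ hne)
        rw [← hrdef] at hle hpre hmin
        have hr0 : (0 : Int) ≤ r := le_trans (by omega) hle
        set m := r.toNat with hm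
        have hrm : r = (m : Int) := by omega
        have hkm : k ≤ m := by omega
        have hlen7 : m + pvTok.length ≤ s.length := by
          have := hpre.length_le
          simp only [List.length_drop] at this
          omega
        have hprobe : pvAProbe s (r - 1) = pvOkAt s m := by
          rw [hrm]
          exact pvAProbe_eq_okAt s m (by omega)
        have hskip : pvMinVal s k = pvMinVal s m := by
          apply pvMinVal_skip s k m hkm
          intro j h1 h2
          simp only [Bool.and_eq_false_iff]
          right
          exact (Bool.not_eq_true _).mp
            (fun hsw => hmin j h1 (by omega) ((PySem.Chars.startswith_iff _ _).mp hsw))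
        rw [if_neg (by omega)]
        by_cases hok : pvOkAt s m = true
        · rw [if_pos (by rw [hprobe]; exact hok), hskip, pvMinVal, dif_pos (by omega),
            if_pos (by rw [hok, (PySem.Chars.startswith_iff _ _).mpr hpre]; rfl)]
          exact hrm
        · rw [if_neg (by rw [hprobe]; exact hok)]
          rw [ih (s.length + pvTok.length - (m + pvTok.length)) (by omega)
            (m + pvTok.length) (by omega) rfl]
          rw [hskip]
          symm
          apply pvMinVal_skip s m (m + pvTok.length) (by omega)
          intro j h1 h2
          by_cases hjm : j = m
          · subst hjm
            simp [hok]
          · simp only [Bool.and_eq_false_iff]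
            right
            exact (Bool.not_eq_true _).mp
              (fun hsw => pvTok_no_overlap s m j hpre (by omega) (by omega)
                ((PySem.Chars.startswith_iff _ _).mp hsw))
  exact fun k hk => key (s.length + pvTok.length - k) k hk rfl

-- ===== VERDICT (by name: the statement is the Claim_ definition above) =====
theorem find_hashes_pair_start_py_spec : Claim_equal_find_hashes_pair_start_py := by
  intro line _
  unfold Spec_find_hashes_pair_start_py find_hashes_pair_start_py find_hashes_pair_start_py_alt
  have hA := pvALoop_eq_minVal line.toList 0 (Nat.zero_le _)
  have hB := pvBScan_eq_minVal line.toList 0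
  simp only [List.drop_zero] at hB
  rw [hA, ← hB]
  rfl
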